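-- pv_equiv track=rewrite | github.com/yeahzizi/algorithm | 프로그래머스/level 2/PR. level2. 완전탐색.py | solution
-- ===== SOURCE A (Python) =====
-- from itertools import product
--
-- def solution(word):
--     answer = 0
--     alp = ["A", "E", "I", "O", "U"]
--
--     dict = []
--     for i in range(1, 6):
--         for j in product(alp, repeat=i):
--             dict.append("".join(j))
--
--     dict.sort()
--
--     for i in range(len(dict)):
--         if dict[i] == word:
--             return i + 1
-- ===== SOURCE B (Python) =====
-- VOWEL_INDEX = {"A": 0, "E": 1, "I": 2, "O": 3, "U": 4}
-- # WEIGHTS[i] = number of dictionary words having a fixed letter at position i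
-- # as a prefix: 1+5+25+125+625 = 781 at position 0, then 156, 31, 6, 1.
-- WEIGHTS = (781, 156, 31, 6, 1)
--
--
-- def solution(word):
--     if not 1 <= len(word) <= 5:
--         return None
--     answer = 0
--     for weight, ch in zip(WEIGHTS, word):
--         idx = VOWEL_INDEX.get(ch)
--         if idx is None:
--             return None
--         answer += weight * idx + 1
--     return answer
-- ===== Notes on version B (the rewrite author's own statement) =====
-- stated objective: faster
-- what changed: Instead of generating all 3905 vowel words, sorting them and linearly scanning for the word, B computes the word's 1-based position in the sorted dictionary directly by a positional-weight formula over the word's characters (and returns None for words outside the dictionary).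
import Mathlib
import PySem

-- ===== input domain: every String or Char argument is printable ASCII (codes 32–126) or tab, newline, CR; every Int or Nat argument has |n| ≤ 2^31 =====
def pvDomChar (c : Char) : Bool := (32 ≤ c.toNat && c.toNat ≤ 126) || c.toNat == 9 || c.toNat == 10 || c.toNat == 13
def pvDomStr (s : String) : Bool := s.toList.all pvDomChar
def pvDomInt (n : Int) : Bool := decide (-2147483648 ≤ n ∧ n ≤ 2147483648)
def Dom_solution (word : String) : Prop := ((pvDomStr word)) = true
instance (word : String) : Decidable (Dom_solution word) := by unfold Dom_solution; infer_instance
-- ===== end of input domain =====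

-- B replaces A's generate-3905-words/sort/linear-scan by a direct positional-weight
-- formula over the word's characters (objective: faster by skipping the dictionary).


-- ===== PORT A =====
def pvAlp : List String := ["A", "E", "I", "O", "U"]

-- itertools.product(alp, repeat=i), tuples in Python's order (rightmost varies fastest)
def pvProd : Nat → List (List String)
  | 0 => [[]]
  | n + 1 => pvAlp.flatMap (fun x => (pvProd n).map (fun t => x :: t))

-- the two nested 'for' loops building dict (one append per element)
def pvDict : List String :=
  (PySem.List.pyRange 1 6 1).foldl
    (fun acc i => (pvProd i.toNat).foldl (fun acc2 j => acc2 ++ [PySem.Str.join "" j]) acc) []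

-- 'for i in range(len(dict)): if dict[i] == word: return i + 1'
def pvScan (word : String) : List String → Int → Option Int
  | [], _ => none
  | d :: rest, i => if d = word then some (i + 1) else pvScan word rest (i + 1)

def solution (word : String) : Option Int :=
  pvScan word (PySem.List.sorted pvDict (fun x => x) false) 0

-- ===== PORT B =====
def pvVowelIndex : PySem.Dict Char Int :=
  PySem.Dict.mk [('A', 0), ('E', 1), ('I', 2), ('O', 3), ('U', 4)]

def pvWeights : List Int := [781, 156, 31, 6, 1]

-- 'for weight, ch in zip(WEIGHTS, word): …' with accumulator answer
def pvLoopB : List (Int × Char) → Int → Option Int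
  | [], acc => some acc
  | (w, ch) :: rest, acc =>
    match PySem.Dict.get? pvVowelIndex ch with
    | none => none
    | some idx => pvLoopB rest (acc + w * idx + 1)

def solution_alt (word : String) : Option Int :=
  if 1 ≤ PySem.Str.len word ∧ PySem.Str.len word ≤ 5 then
    pvLoopB (List.zip pvWeights word.toList) 0
  else none

-- ===== PRECONDITION & SPEC =====
def Spec_solution (word : String) (out : Option Int) : Prop := out = solution_alt word
instance (word : String) (out : Option Int) : Decidable (Spec_solution word out) := by unfold Spec_solution; infer_instance

-- ===== CLAIM (what is proved, stated in full; the proofs are below) =====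
def Claim_equal_solution : Prop := ∀ (word : String), Dom_solution word → Spec_solution word (solution word)

-- ===== LEMMAS AND PROOFS =====

-- Canonical char-level picture of A's dictionary.
def pvAlpC : List Char := ['A', 'E', 'I', 'O', 'U']

def pvFF (L : List (List Char)) : List (List Char) :=
  pvAlpC.flatMap (fun c => L.map (fun t => c :: t))

-- all vowel words of length exactly n, in product order
def pvU : Nat → List (List Char)
  | 0 => [[]]
  | n + 1 => pvFF (pvU n)

-- all vowel words of length 1..n, in lexicographic order
def pvT : Nat → List (List Char)
  | 0 => []
  | n + 1 => pvAlpC.flatMap (fun c => [c] :: (pvT n).map (fun t => c :: t))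

def pvLenT : Nat → Nat
  | 0 => 0
  | n + 1 => 5 * (1 + pvLenT n)

-- 0-based index of w in pvT n (none if absent)
def pvRank : Nat → List Char → Option Nat
  | _, [] => none
  | 0, _ :: _ => none
  | n + 1, c :: rest =>
    match PySem.List.index? pvAlpC c with
    | none => none
    | some d =>
      if rest = [] then some (d * (1 + pvLenT n))
      else (pvRank n rest).map (fun r => d * (1 + pvLenT n) + 1 + r)

theorem pvT_length : ∀ n, (pvT n).length = pvLenT n := by
  intro n
  induction n with
  | zero => rfl
  | succ n ih => simp [pvT, pvLenT, pvAlpC, List.length_flatMap, ih]; omega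

theorem pvT_ne_nil : ∀ n, ∀ w ∈ pvT n, w ≠ [] := by
  intro n
  induction n with
  | zero => intro w hw; simp [pvT] at hw
  | succ n ih =>
    intro w hw
    simp only [pvT, List.mem_flatMap, List.mem_cons, List.mem_map] at hw
    obtain ⟨c, _, hw⟩ := hw
    rcases hw with rfl | ⟨t, _, rfl⟩ <;> simp

theorem pvHeads (cs : List Char) (L : List (List Char)) :
    ∀ w ∈ cs.flatMap (fun a => [a] :: L.map (fun t => a :: t)), ∃ b ∈ cs, ∃ t, w = b :: t := by
  intro w hw
  simp only [List.mem_flatMap, List.mem_cons, List.mem_map] at hw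
  obtain ⟨b, hb, hw⟩ := hw
  rcases hw with rfl | ⟨t, _, rfl⟩
  · exact ⟨b, hb, [], rfl⟩
  · exact ⟨b, hb, t, rfl⟩

theorem pvIndexAppend {α : Type} [BEq α] [LawfulBEq α] (l1 l2 : List α) (v : α) (h : v ∉ l1) :
    PySem.List.index? (l1 ++ l2) v = (PySem.List.index? l2 v).map (fun k : Nat => k + l1.length) := by
  induction l1 with
  | nil => simp
  | cons x l1 ih =>
    have hx : x ≠ v := by rintro rfl; exact h (List.mem_cons_self ..)
    rw [List.cons_append, PySem.List.index?_cons_of_ne _ hx,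
      ih (fun hm => h (List.mem_cons_of_mem _ hm))]
    cases hy : PySem.List.index? l2 v <;> simp [hy] <;> omega

theorem pvIndexMapCons (L : List (List Char)) (c : Char) (rest : List Char) :
    PySem.List.index? (L.map (fun t => c :: t)) (c :: rest) = PySem.List.index? L rest := by
  induction L with
  | nil => simp
  | cons t L ih =>
    by_cases h : t = rest
    · subst h; rw [List.map_cons, PySem.List.index?_cons_self, PySem.List.index?_cons_self]
    · have h1 : (c :: t) ≠ (c :: rest) := by simpa using h
      rw [List.map_cons, PySem.List.index?_cons_of_ne _ h1, PySem.List.index?_cons_of_ne _ h, ih]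

theorem pvIndexMapOfList (L : List (List Char)) (w : String) :
    PySem.List.index? (L.map String.ofList) w = PySem.List.index? L w.toList := by
  induction L with
  | nil => simp
  | cons t L ih =>
    by_cases h : t = w.toList
    · have h1 : String.ofList t = w := by rw [h, String.ofList_toList]
      rw [List.map_cons, h1, h, PySem.List.index?_cons_self, PySem.List.index?_cons_self]
    · have h1 : String.ofList t ≠ w := by
        intro he; exact h (by rw [← he, String.toList_ofList])
      rw [List.map_cons, PySem.List.index?_cons_of_ne _ h1, PySem.List.index?_cons_of_ne _ h, ih]

theorem pvInner : ∀ (cs : List Char), cs.Nodup → ∀ (L : List (List Char)), (∀ t ∈ L, t ≠ []) →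
    ∀ (c : Char) (rest : List Char),
    PySem.List.index? (cs.flatMap (fun a => [a] :: L.map (fun t => a :: t))) (c :: rest) =
      match PySem.List.index? cs c with
      | none => none
      | some d =>
        if rest = [] then some (d * (1 + L.length))
        else (PySem.List.index? L rest).map (fun r : Nat => d * (1 + L.length) + 1 + r) := by
  intro cs
  induction cs with
  | nil => intro _ L _ c rest; simp
  | cons a cs ih =>
    intro hnd L hne c rest
    have hanotin : a ∉ cs := (List.nodup_cons.mp hnd).1
    rw [List.flatMap_cons]
    by_cases hca : c = a
    · subst hca
      rw [show PySem.List.index? (c :: cs) c = some 0 from PySem.List.index?_cons_self c cs]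
      by_cases hr : rest = []
      · subst hr
        rw [List.cons_append, PySem.List.index?_cons_self]
        simp
      · have h1 : ([c] : List Char) ≠ c :: rest := by
          intro he; injection he with _ h2; exact hr h2.symm
        rw [List.cons_append, PySem.List.index?_cons_of_ne _ h1]
        have hnotT : (c :: rest) ∉ cs.flatMap (fun a => [a] :: L.map (fun t => a :: t)) := by
          intro hmem
          obtain ⟨b, hb, t, he⟩ := pvHeads cs L _ hmem
          injection he with he1 _
          exact hanotin (he1 ▸ hb)
        by_cases hrL : rest ∈ L
        · have hmemM : (c :: rest) ∈ L.map (fun t => c :: t) := List.mem_map.mpr ⟨rest, hrL, rfl⟩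
          rw [PySem.List.index?_append_of_mem _ hmemM, pvIndexMapCons]
          cases hy : PySem.List.index? L rest <;> simp [hy, hr] <;> omega
        · have hnotM : (c :: rest) ∉ L.map (fun t => c :: t) := by
            intro hm
            obtain ⟨t, ht, he⟩ := List.mem_map.mp hm
            injection he with _ h2
            exact hrL (h2 ▸ ht)
          rw [(PySem.List.index?_eq_none_iff _ _).mpr (fun hm => by
            rcases List.mem_append.mp hm with hm | hm
            · exact hnotM hm
            · exact hnotT hm)]
          rw [(PySem.List.index?_eq_none_iff _ _).mpr hrL]
          simp [hr]
    · have h1 : ([a] : List Char) ≠ c :: rest := by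
        intro he; injection he with he1 _; exact hca he1.symm
      have hnotM : (c :: rest) ∉ L.map (fun t => a :: t) := by
        intro hm
        obtain ⟨t, _, he⟩ := List.mem_map.mp hm
        injection he with he1 _
        exact hca he1.symm
      rw [List.cons_append, PySem.List.index?_cons_of_ne _ h1,
        pvIndexAppend _ _ _ hnotM, ih (List.nodup_cons.mp hnd).2 L hne c rest,
        PySem.List.index?_cons_of_ne _ (fun he => hca he.symm)]
      cases hcs : PySem.List.index? cs c with
      | none => simp [hcs]
      | some d =>
        by_cases hr : rest = []
        · simp [hcs, hr]; ring
        · cases hy : PySem.List.index? L rest <;> simp [hcs, hy, hr] <;> ring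

theorem pvIndexT : ∀ n (w : List Char), PySem.List.index? (pvT n) w = pvRank n w := by
  intro n
  induction n with
  | zero => intro w; cases w <;> simp [pvT, pvRank]
  | succ n ih =>
    intro w
    cases w with
    | nil =>
      rw [(PySem.List.index?_eq_none_iff _ _).mpr (fun h => pvT_ne_nil (n + 1) [] h rfl)]
      rfl
    | cons c rest =>
      rw [show pvT (n + 1) = pvAlpC.flatMap (fun c => [c] :: (pvT n).map (fun t => c :: t)) from rfl]
      rw [pvInner pvAlpC (by decide) (pvT n) (pvT_ne_nil n) c rest, pvT_length]
      cases hic : PySem.List.index? pvAlpC c with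
      | none => simp only [pvRank, hic]
      | some d =>
        simp only [pvRank, hic]
        by_cases hr : rest = []
        · rw [if_pos hr, if_pos hr]
        · rw [if_neg hr, if_neg hr, ih rest]

theorem pvScan_eq (word : String) : ∀ (l : List String) (i : Int),
    pvScan word l i = (PySem.List.index? l word).map (fun k : Nat => i + (k : Int) + 1) := by
  intro l
  induction l with
  | nil => intro i; simp [pvScan]
  | cons d rest ih =>
    intro i
    rw [show pvScan word (d :: rest) i =
      (if d = word then some (i + 1) else pvScan word rest (i + 1)) from rfl]
    by_cases h : d = word
    · subst h
      rw [if_pos rfl, PySem.List.index?_cons_self]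
      simp
    · rw [if_neg h, PySem.List.index?_cons_of_ne _ h, ih (i + 1)]
      cases hy : PySem.List.index? rest word <;> simp [hy] <;> push_cast <;> ring

-- ---- permutation: A's dictionary is a rearrangement of pvT 5 ----

theorem pvPermFlatMapAppend {α β : Type} (l : List α) (f g : α → List β) :
    (l.flatMap (fun c => f c ++ g c)).Perm (l.flatMap f ++ l.flatMap g) := by
  induction l with
  | nil => simp
  | cons a l ih =>
    simp only [List.flatMap_cons]
    refine ((ih.append_left (f a ++ g a))).trans ?_
    simp only [List.append_assoc]
    refine List.Perm.append_left (f a) ?_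
    rw [← List.append_assoc, ← List.append_assoc]
    exact List.perm_append_comm.append_right _

theorem pvFF_perm {X Y : List (List Char)} (h : X.Perm Y) : (pvFF X).Perm (pvFF Y) := by
  simp only [pvFF, pvAlpC, List.flatMap_cons, List.flatMap_nil, List.append_nil]
  exact (h.map _).append ((h.map _).append ((h.map _).append ((h.map _).append (h.map _))))

theorem pvFF_append (X Y : List (List Char)) : (pvFF (X ++ Y)).Perm (pvFF X ++ pvFF Y) := by
  unfold pvFF
  simp only [List.map_append]
  exact pvPermFlatMapAppend pvAlpC _ _

theorem pvA (L : List (List Char)) :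
    (pvAlpC.flatMap (fun c => [c] :: L.map (fun t => c :: t))).Perm (pvU 1 ++ pvFF L) := by
  have h1 : ∀ c : Char, ([c] :: L.map (fun t => c :: t)) = [[c]] ++ L.map (fun t => c :: t) :=
    fun _ => rfl
  simp only [h1]
  refine (pvPermFlatMapAppend pvAlpC _ _).trans ?_
  have h2 : pvAlpC.flatMap (fun c => [[c]]) = pvU 1 := by decide
  rw [h2]
  exact List.Perm.refl _

def pvK : Nat → List (List Char)
  | 0 => []
  | n + 1 => pvU 1 ++ pvFF (pvK n)

theorem pvTK : ∀ n, (pvT n).Perm (pvK n) := by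
  intro n
  induction n with
  | zero => exact List.Perm.refl _
  | succ n ih => exact (pvA (pvT n)).trans (List.Perm.append_left _ (pvFF_perm ih))

theorem pvKU : (pvK 5).Perm (pvU 1 ++ (pvU 2 ++ (pvU 3 ++ (pvU 4 ++ pvU 5)))) := by
  have h1 : (pvK 1).Perm (pvU 1) := by
    rw [show pvK 1 = pvU 1 ++ pvFF (pvK 0) from rfl, show pvFF (pvK 0) = [] from rfl]
    simp
  have h2 : (pvK 2).Perm (pvU 1 ++ pvU 2) := by
    rw [show pvK 2 = pvU 1 ++ pvFF (pvK 1) from rfl]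
    exact List.Perm.append_left _ (pvFF_perm h1)
  have h3 : (pvK 3).Perm (pvU 1 ++ (pvU 2 ++ pvU 3)) := by
    rw [show pvK 3 = pvU 1 ++ pvFF (pvK 2) from rfl]
    refine List.Perm.append_left _ ?_
    exact (pvFF_perm h2).trans (pvFF_append (pvU 1) (pvU 2))
  have h4 : (pvK 4).Perm (pvU 1 ++ (pvU 2 ++ (pvU 3 ++ pvU 4))) := by
    rw [show pvK 4 = pvU 1 ++ pvFF (pvK 3) from rfl]
    refine List.Perm.append_left _ ?_
    refine (pvFF_perm h3).trans ?_
    refine (pvFF_append (pvU 1) (pvU 2 ++ pvU 3)).trans ?_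
    exact List.Perm.append_left _ (pvFF_append (pvU 2) (pvU 3))
  rw [show pvK 5 = pvU 1 ++ pvFF (pvK 4) from rfl]
  refine List.Perm.append_left _ ?_
  refine (pvFF_perm h4).trans ?_
  refine (pvFF_append (pvU 1) (pvU 2 ++ (pvU 3 ++ pvU 4))).trans ?_
  refine List.Perm.append_left _ ?_
  refine (pvFF_append (pvU 2) (pvU 3 ++ pvU 4)).trans ?_
  exact List.Perm.append_left _ (pvFF_append (pvU 3) (pvU 4))

-- ---- strict sortedness of pvT ----

theorem pvPairwiseBlocks : ∀ (cs : List Char), cs.Pairwise (· < ·) →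
    ∀ (L : List (List Char)), L.Pairwise (· < ·) → (∀ t ∈ L, t ≠ []) →
    (cs.flatMap (fun a => [a] :: L.map (fun t => a :: t))).Pairwise (· < ·) := by
  intro cs
  induction cs with
  | nil => intro _ L _ _; simp
  | cons a cs ih =>
    intro hcs L hL hne
    rw [List.flatMap_cons, List.pairwise_append]
    refine ⟨?_, ih hcs.of_cons L hL hne, ?_⟩
    · rw [List.pairwise_cons]
      refine ⟨?_, ?_⟩
      · intro y hy
        obtain ⟨t, ht, rfl⟩ := List.mem_map.mp hy
        rcases t with _ | ⟨x, t⟩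
        · exact absurd rfl (hne _ ht)
        · exact List.cons_lt_cons_iff.mpr (Or.inr ⟨rfl, List.nil_lt_cons x t⟩)
      · rw [List.pairwise_map]
        exact hL.imp (fun h => List.cons_lt_cons_iff.mpr (Or.inr ⟨rfl, h⟩))
    · intro x hx y hy
      obtain ⟨b, hb, t, rfl⟩ := pvHeads cs L y hy
      have hab : a < b := (List.pairwise_cons.mp hcs).1 b hb
      rcases List.mem_cons.mp hx with rfl | hx'
      · exact List.cons_lt_cons_iff.mpr (Or.inl hab)
      · obtain ⟨t', _, rfl⟩ := List.mem_map.mp hx'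
        exact List.cons_lt_cons_iff.mpr (Or.inl hab)

theorem pvPairwiseT : ∀ n, (pvT n).Pairwise (· < ·) := by
  intro n
  induction n with
  | zero => simp [pvT]
  | succ n ih => exact pvPairwiseBlocks pvAlpC (by decide) (pvT n) ih (pvT_ne_nil n)

-- ---- A's dictionary at the char level ----

def pvJ (j : List String) : List Char := (PySem.Str.join "" j).toList

theorem pvIntercalateNilCons (x : List Char) (t : List (List Char)) :
    List.intercalate [] (x :: t) = x ++ List.intercalate [] t := by
  cases t with
  | nil => simp [List.intercalate]
  | cons y t => simp [List.intercalate, List.intersperse]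

theorem pvJoinCons (x : String) (t : List String) :
    pvJ (x :: t) = x.toList ++ pvJ t := by
  unfold pvJ
  rw [PySem.Str.toList_join, PySem.Str.toList_join]
  have h0 : "".toList = ([] : List Char) := rfl
  rw [h0]
  show PySem.Chars.join [] (x.toList :: t.map String.toList) = _
  simp only [PySem.Chars.join, pvIntercalateNilCons]

theorem pvProdJoin : ∀ n, (pvProd n).map pvJ = pvU n := by
  intro n
  induction n with
  | zero =>
    show [pvJ []] = [[]]
    simp [pvJ, PySem.Str.toList_join, PySem.Chars.join, List.intercalate]
  | succ n ih =>
    have hblk : ∀ (x : String) (c : Char), x.toList = [c] →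
        ((pvProd n).map (fun t => x :: t)).map pvJ = (pvU n).map (fun z => c :: z) := by
      intro x c hx
      rw [← ih, List.map_map, List.map_map]
      apply List.map_congr_left
      intro t _
      simp [Function.comp, pvJoinCons, hx]
    rw [show pvProd (n + 1) = pvAlp.flatMap (fun x => (pvProd n).map (fun t => x :: t)) from rfl,
      show pvU (n + 1) = pvFF (pvU n) from rfl]
    simp only [pvAlp, pvFF, pvAlpC, List.flatMap_cons, List.flatMap_nil, List.append_nil,
      List.map_append]
    rw [hblk "A" 'A' rfl, hblk "E" 'E' rfl, hblk "I" 'I' rfl, hblk "O" 'O' rfl, hblk "U" 'U' rfl]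

theorem pvDictChars :
    pvDict.map String.toList = pvU 1 ++ (pvU 2 ++ (pvU 3 ++ (pvU 4 ++ pvU 5))) := by
  have hRange : PySem.List.pyRange 1 6 1 = [1, 2, 3, 4, 5] := by decide
  have hfold : ∀ (P : List (List String)) (acc : List String),
      P.foldl (fun acc2 j => acc2 ++ [PySem.Str.join "" j]) acc =
        acc ++ P.map (fun j => PySem.Str.join "" j) := by
    intro P
    induction P with
    | nil => intro acc; simp
    | cons j P ih => intro acc; simp [ih]
  have hcomp : ∀ (P : List (List String)),
      (P.map (fun j => PySem.Str.join "" j)).map String.toList = P.map pvJ := by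
    intro P; rw [List.map_map]; rfl
  rw [show pvDict = (PySem.List.pyRange 1 6 1).foldl
    (fun acc i => (pvProd i.toNat).foldl (fun acc2 j => acc2 ++ [PySem.Str.join "" j]) acc) []
    from rfl, hRange]
  simp only [List.foldl_cons, List.foldl_nil, hfold,
    List.nil_append, List.map_append, List.append_assoc, hcomp]
  rw [show ((1 : Int).toNat) = 1 from rfl, show ((2 : Int).toNat) = 2 from rfl,
    show ((3 : Int).toNat) = 3 from rfl, show ((4 : Int).toNat) = 4 from rfl,
    show ((5 : Int).toNat) = 5 from rfl]
  rw [pvProdJoin 1, pvProdJoin 2, pvProdJoin 3, pvProdJoin 4, pvProdJoin 5]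

-- ---- the sorted dictionary is exactly pvT 5 ----

theorem pvSortedEq :
    PySem.List.sorted pvDict (fun x => x) false = (pvT 5).map String.ofList := by
  have hperm : ((pvT 5).map String.ofList).Perm pvDict := by
    have h1 : (pvT 5).Perm (pvDict.map String.toList) := by
      rw [pvDictChars]
      exact (pvTK 5).trans pvKU
    have h2 := h1.map String.ofList
    have h3 : (pvDict.map String.toList).map String.ofList = pvDict := by
      rw [List.map_map]
      have h4 : (String.ofList ∘ String.toList) = id := funext (fun s => String.ofList_toList)
      rw [h4, List.map_id]
    rwa [h3] at h2
  have hpw : List.Pairwise (fun a b : String => a < b) ((pvT 5).map String.ofList) := by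
    rw [List.pairwise_map]
    exact (pvPairwiseT 5).imp (fun hab => String.lt_iff_toList_lt.mpr (by
      simpa [String.toList_ofList] using hab))
  exact PySem.List.sorted_eq_of_perm_of_pairwise_lt pvDict ((pvT 5).map String.ofList)
    (fun x => x) hperm hpw

-- ---- B's loop computes pvRank + 1 ----

theorem pvGet (c : Char) :
    PySem.Dict.get? pvVowelIndex c =
      (PySem.List.index? pvAlpC c).map (fun d : Nat => (d : Int)) := by
  by_cases hA : c = 'A'
  · subst hA; decide
  by_cases hE : c = 'E'
  · subst hE; decide
  by_cases hI : c = 'I'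
  · subst hI; decide
  by_cases hO : c = 'O'
  · subst hO; decide
  by_cases hU : c = 'U'
  · subst hU; decide
  have hnot : c ∉ pvAlpC := by simp [pvAlpC, hA, hE, hI, hO, hU]
  rw [(PySem.List.index?_eq_none_iff _ _).mpr hnot]
  have gA : ('A' == c) = false := beq_eq_false_iff_ne.mpr (Ne.symm hA)
  have gE : ('E' == c) = false := beq_eq_false_iff_ne.mpr (Ne.symm hE)
  have gI : ('I' == c) = false := beq_eq_false_iff_ne.mpr (Ne.symm hI)
  have gO : ('O' == c) = false := beq_eq_false_iff_ne.mpr (Ne.symm hO)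
  have gU : ('U' == c) = false := beq_eq_false_iff_ne.mpr (Ne.symm hU)
  simp [pvVowelIndex, PySem.Dict.get?_mk_cons, PySem.Dict.get?, gA, gE, gI, gO, gU]

def pvSzs : Nat → List Int
  | 0 => []
  | n + 1 => ((1 + pvLenT n : Nat) : Int) :: pvSzs n

theorem pvSzs5 : pvSzs 5 = pvWeights := by decide

theorem pvLoopB_eq : ∀ (n : Nat) (w : List Char) (acc : Int), w ≠ [] → w.length ≤ n →
    pvLoopB (List.zip (pvSzs n) w) acc =
      (pvRank n w).map (fun r : Nat => acc + (r : Int) + 1) := by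
  intro n
  induction n with
  | zero =>
    intro w acc hne hlen
    exact absurd (List.length_eq_zero_iff.mp (Nat.le_zero.mp hlen)) hne
  | succ n ih =>
    intro w acc hne hlen
    cases w with
    | nil => exact absurd rfl hne
    | cons c rest =>
      rw [show pvSzs (n + 1) = ((1 + pvLenT n : Nat) : Int) :: pvSzs n from rfl,
        List.zip_cons_cons]
      rw [show pvLoopB ((((1 + pvLenT n : Nat) : Int), c) :: List.zip (pvSzs n) rest) acc =
        (match PySem.Dict.get? pvVowelIndex c with
         | none => none
         | some idx =>
            pvLoopB (List.zip (pvSzs n) rest) (acc + ((1 + pvLenT n : Nat) : Int) * idx + 1))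
        from rfl]
      rw [pvGet c]
      cases hic : PySem.List.index? pvAlpC c with
      | none => simp only [hic, Option.map_none, pvRank]
      | some d =>
        simp only [hic, Option.map_some]
        by_cases hr : rest = []
        · subst hr
          simp only [List.zip_nil_right]
          rw [show pvLoopB [] (acc + ((1 + pvLenT n : Nat) : Int) * (d : Int) + 1) =
            some (acc + ((1 + pvLenT n : Nat) : Int) * (d : Int) + 1) from rfl]
          simp only [pvRank, hic, if_pos, Option.map_some, Option.some.injEq]
          push_cast
          ring
        · have hlen' : rest.length ≤ n := by simp at hlen; omega
          rw [ih rest _ hr hlen']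
          simp only [pvRank, hic, if_neg hr]
          cases hy : pvRank n rest <;> simp [hy] <;> push_cast <;> ring

theorem pvRank_none_of_long : ∀ (n : Nat) (w : List Char), n < w.length → pvRank n w = none := by
  intro n
  induction n with
  | zero =>
    intro w hw
    cases w with
    | nil => simp at hw
    | cons c rest => rfl
  | succ n ih =>
    intro w hw
    cases w with
    | nil => rfl
    | cons c rest =>
      have hr : rest ≠ [] := by
        intro he
        rw [he] at hw
        simp at hw
      have hlen : n < rest.length := by simpa using hw
      simp only [pvRank]
      cases hic : PySem.List.index? pvAlpC c <;> simp [hic, hr, ih rest hlen]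

-- ===== VERDICT (by name: the statement is the Claim_ definition above) =====
theorem solution_spec : Claim_equal_solution := by
  unfold Claim_equal_solution Spec_solution
  intro word _
  rw [show solution word = pvScan word (PySem.List.sorted pvDict (fun x => x) false) 0 from rfl,
    pvSortedEq, pvScan_eq word ((pvT 5).map String.ofList) 0, pvIndexMapOfList,
    pvIndexT 5 word.toList,
    show solution_alt word = (if 1 ≤ PySem.Str.len word ∧ PySem.Str.len word ≤ 5 then
      pvLoopB (List.zip pvWeights word.toList) 0 else none) from rfl]
  have hlen : PySem.Str.len word = (word.toList.length : Int) := by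
    simp [PySem.Str.len_eq]
  rw [hlen]
  by_cases h0 : word.toList = []
  · simp [h0, pvRank]
  · by_cases h5 : word.toList.length ≤ 5
    · have hge : (1 : Int) ≤ (word.toList.length : Int) := by
        have h00 : word.toList.length ≠ 0 := fun he => h0 (List.length_eq_zero_iff.mp he)
        omega
      rw [if_pos ⟨hge, by exact_mod_cast h5⟩, ← pvSzs5, pvLoopB_eq 5 word.toList 0 h0 h5]
    · rw [if_neg (fun hc => h5 (by exact_mod_cast hc.2)),
        pvRank_none_of_long 5 word.toList (by omega)]
      rfl
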